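-- pv_equiv track=rewrite | github.com/vanyakosmos/advent_of_code | 2025/04/2.py | _count_rolls
-- ===== SOURCE A (Python) =====
-- def _count_rolls(mat: list[list[int]]):
--     res = 0
--     new_mat = []
--     for y in range(len(mat)):
--         new_row = mat[y].copy()
--         new_mat.append(new_row)
--         for x in range(len(mat[y])):
--             if mat[y][x] == 0:
--                 continue
--
--             y0, y1 = max(0, y - 1), min(len(mat) - 1, y + 1)
--             x0, x1 = max(0, x - 1), min(len(mat[0]) - 1, x + 1)
--             s = 0
--             for dy in range(y0, y1 + 1):
--                 for dx in range(x0, x1 + 1):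
--                     s += mat[dy][dx]
--             if s <= 4:
--                 res += 1
--                 new_row[x] = 0
--
--     return new_mat, res
-- ===== SOURCE B (Python) =====
-- def _prefix(row):
--     p = [0]
--     t = 0
--     for v in row:
--         t += v
--         p.append(t)
--     return p
--
--
-- def _count_rolls(mat: list[list[int]]):
--     n = len(mat)
--     m0 = len(mat[0]) if mat else 0
--     pref = [_prefix(row) for row in mat]
--     res = 0
--     new_mat = []
--     for y, row in enumerate(mat):
--         y0, y1 = max(0, y - 1), min(n - 1, y + 1)
--         new_row = []
--         for x, v in enumerate(row):
--             if v == 0: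
--                 new_row.append(v)
--                 continue
--             x0, x1 = max(0, x - 1), min(m0 - 1, x + 1)
--             s = 0
--             if x0 <= x1:
--                 for p in pref[y0:y1 + 1]:
--                     s += p[x1 + 1] - p[x0]
--             if s <= 4:
--                 res += 1
--                 new_row.append(0)
--             else:
--                 new_row.append(v)
--         new_mat.append(new_row)
--     return new_mat, res
-- ===== Notes on version B (the rewrite author's own statement) =====
-- stated objective: faster
-- what changed: B precomputes a prefix-sum table per row once and reads each clamped window row as one subtraction of two prefix values (and builds the new rows by appending instead of mutating row copies), replacing A's per-cell double loop over the 3x3 window.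
import Mathlib
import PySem

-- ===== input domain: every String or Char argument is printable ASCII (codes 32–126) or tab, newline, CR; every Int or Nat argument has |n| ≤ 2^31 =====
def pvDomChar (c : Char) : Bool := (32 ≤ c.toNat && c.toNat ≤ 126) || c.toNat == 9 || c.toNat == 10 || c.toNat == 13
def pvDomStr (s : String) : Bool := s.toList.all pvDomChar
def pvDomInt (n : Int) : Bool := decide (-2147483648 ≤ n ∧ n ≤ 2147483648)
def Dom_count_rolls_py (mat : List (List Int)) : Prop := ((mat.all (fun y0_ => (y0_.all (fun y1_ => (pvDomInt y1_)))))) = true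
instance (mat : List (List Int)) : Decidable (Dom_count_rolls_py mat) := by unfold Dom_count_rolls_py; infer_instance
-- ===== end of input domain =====

-- B replaces A's per-cell 3x3 double summation loop by per-row prefix-sum tables (one subtraction per
-- window row, a measured constant-factor speedup) and builds the new rows by appending instead of
-- mutating row copies; same return value.

-- ===== PORT A =====
-- mat[i] / row[i] with a default; every index is in range on the admitted inputs
def pvRowD (mat : List (List Int)) (i : Int) : List Int := PySem.List.pyGetD mat i []
def pvAtD (row : List Int) (i : Int) : Int := PySem.List.pyGetD row i 0

-- literal transliteration of _count_rolls: new_row mutated in place (pySetD), window sum by a double loop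
def count_rolls_py (mat : List (List Int)) : List (List Int) × Int :=
  let n : Int := mat.length
  (PySem.List.pyRange 0 n 1).foldl
    (fun (acc : List (List Int) × Int) y =>
      let row := pvRowD mat y
      let inner := (PySem.List.pyRange 0 (row.length : Int) 1).foldl
        (fun (st : List Int × Int) x =>
          if pvAtD row x = 0 then st
          else
            let y0 := max 0 (y - 1)
            let y1 := min (n - 1) (y + 1)
            let x0 := max 0 (x - 1)
            let x1 := min (((pvRowD mat 0).length : Int) - 1) (x + 1)
            let s := (PySem.List.pyRange y0 (y1 + 1) 1).foldl
              (fun s dy =>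
                (PySem.List.pyRange x0 (x1 + 1) 1).foldl
                  (fun s dx => s + pvAtD (pvRowD mat dy) dx) s) 0
            if s ≤ 4 then (PySem.List.pySetD st.1 x 0, st.2 + 1) else st)
        (row, acc.2)
      (acc.1 ++ [inner.1], inner.2))
    ([], 0)

-- ===== PORT B =====
-- port of Source B's _prefix: running-total fold producing [0, a0, a0+a1, …]
def pvPrefix (row : List Int) : List Int :=
  (row.foldl (fun (st : List Int × Int) v => (st.1 ++ [st.2 + v], st.2 + v)) (([0] : List Int), (0 : Int))).1

-- literal transliteration of Source B's _count_rolls: prefix table, window sum = one subtraction per window row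
def count_rolls_py_alt (mat : List (List Int)) : List (List Int) × Int :=
  let n : Int := mat.length
  let m0 : Int := match mat with | [] => 0 | r :: _ => (r.length : Int)
  let pref := mat.map pvPrefix
  (PySem.List.enumerate mat 0).foldl
    (fun (acc : List (List Int) × Int) yrow =>
      let y := yrow.1
      let y0 := max 0 (y - 1)
      let y1 := min (n - 1) (y + 1)
      let inner := (PySem.List.enumerate yrow.2 0).foldl
        (fun (st : List Int × Int) xv =>
          if xv.2 = 0 then (st.1 ++ [xv.2], st.2)
          else
            let x0 := max 0 (xv.1 - 1)
            let x1 := min (m0 - 1) (xv.1 + 1)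
            let s : Int := if x0 ≤ x1 then
                (PySem.List.slice pref (some y0) (some (y1 + 1))).foldl
                  (fun s p => s + (pvAtD p (x1 + 1) - pvAtD p x0)) 0
              else 0
            if s ≤ 4 then (st.1 ++ [0], st.2 + 1) else (st.1 ++ [xv.2], st.2))
        (([] : List Int), acc.2)
      (acc.1 ++ [inner.1], inner.2))
    ([], 0)

-- ===== PRECONDITION & SPEC =====
-- pvWinOkB mat y x dy = "if row dy lies in cell (y,x)'s clamped window and that window has any columns,
-- its clamped right column bound min(len(mat[0])-1, x+1) is a valid index into row dy"
def pvWinOkB (mat : List (List Int)) (y x dy : Nat) : Bool :=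
  let x1 : Int := min (((mat.getD 0 []).length : Int) - 1) ((x : Int) + 1)
  !(decide (y ≤ dy + 1) && decide (dy ≤ y + 1) && decide (max 0 ((x : Int) - 1) ≤ x1))
    || decide (x1 < ((mat.getD dy []).length : Int))

-- Pre_ excludes exactly the ragged inputs on which A raises IndexError (a nonzero cell whose clamped
-- window column bound reaches past the end of a neighbouring shorter row); B raises there as well.
def Pre_count_rolls_py (mat : List (List Int)) : Prop :=
  ∀ y < mat.length, ∀ x < (mat.getD y []).length, ∀ dy < mat.length,
    (mat.getD y []).getD x 0 ≠ 0 → pvWinOkB mat y x dy = true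
instance (mat : List (List Int)) : Decidable (Pre_count_rolls_py mat) := by
  unfold Pre_count_rolls_py; infer_instance

def pvWitness_count_rolls_py : List (List Int) := [[1, 2], [3, 4]]

def Spec_count_rolls_py (mat : List (List Int)) (out : List (List Int) × Int) : Prop := out = count_rolls_py_alt mat
instance (mat : List (List Int)) (out : List (List Int) × Int) : Decidable (Spec_count_rolls_py mat out) := by unfold Spec_count_rolls_py; infer_instance

-- ===== CLAIM (what is proved, stated in full; the proofs are below) =====
def Claim_equal_count_rolls_py : Prop := ∀ (mat : List (List Int)), Dom_count_rolls_py mat → Pre_count_rolls_py mat → Spec_count_rolls_py mat (count_rolls_py mat)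

-- ===== LEMMAS AND PROOFS =====

-- running partial sums of a list, starting after total t (proof-side model of pvPrefix)
def pvPsums : List Int → Int → List Int
  | [], _ => []
  | v :: r, t => (t + v) :: pvPsums r (t + v)

theorem pvPsums_length (l : List Int) : ∀ t, (pvPsums l t).length = l.length := by
  induction l with
  | nil => intro t; rfl
  | cons v r ih => intro t; simp [pvPsums, ih]

theorem pvPsums_getElem (l : List Int) : ∀ (t : Int) (j : Nat) (h : j < (pvPsums l t).length),
    (pvPsums l t)[j] = t + (l.take (j + 1)).sum := by
  induction l with
  | nil => intro t j h; simp [pvPsums] at h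
  | cons v r ih =>
    intro t j h
    cases j with
    | zero => simp [pvPsums]
    | succ m =>
      simp only [pvPsums, List.getElem_cons_succ]
      rw [ih (t + v) m (by simpa [pvPsums] using h)]
      simp [List.take_succ_cons]
      ring

theorem pvPrefix_aux (l : List Int) : ∀ (acc : List Int) (t : Int),
    l.foldl (fun (st : List Int × Int) v => (st.1 ++ [st.2 + v], st.2 + v)) (acc, t)
      = (acc ++ pvPsums l t, t + l.sum) := by
  induction l with
  | nil => intro acc t; simp [pvPsums]
  | cons v r ih =>
    intro acc t
    simp only [List.foldl_cons]
    rw [ih]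
    simp [pvPsums, List.append_assoc]
    ring

theorem pvPrefix_eq (l : List Int) : pvPrefix l = 0 :: pvPsums l 0 := by
  simp [pvPrefix, pvPrefix_aux l [0] 0]

theorem pvPrefix_at (r : List Int) (j : Int) (h0 : 0 ≤ j) (hj : j ≤ (r.length : Int)) :
    pvAtD (pvPrefix r) j = (r.take j.toNat).sum := by
  rw [pvPrefix_eq]
  have hj' : j = ((j.toNat : Nat) : Int) := by omega
  rw [pvAtD, hj', PySem.List.pyGetD_natCast]
  cases hj0 : j.toNat with
  | zero => simp
  | succ m =>
    have hm : m < (pvPsums r 0).length := by rw [pvPsums_length]; omega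
    rw [List.getD_cons_succ, List.getD_eq_getElem _ _ hm, pvPsums_getElem r 0 m hm]
    simp

theorem pvSeg_sum (r : List Int) (a : Int) (h0 : 0 ≤ a) : ∀ (k : Nat),
    a + (k : Int) ≤ (r.length : Int) →
    ((PySem.List.pyRange a (a + (k : Int)) 1).map (fun dx => pvAtD r dx)).sum
      = (r.take (a + (k : Int)).toNat).sum - (r.take a.toNat).sum := by
  intro k
  induction k with
  | zero => intro hk; simp [PySem.List.pyRange_one_eq_nil (le_refl a)]
  | succ m ih =>
    intro hk
    have hm : a + (m : Int) ≤ (r.length : Int) := by push_cast at hk ⊢; omega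
    have hsplit : a + ((m + 1 : Nat) : Int) = (a + (m : Int)) + 1 := by push_cast; ring
    rw [hsplit, PySem.List.pyRange_one_succ_right (by omega)]
    rw [List.map_append, List.sum_append, ih hm]
    have hidx : (a + (m : Int)).toNat < r.length := by omega
    have : pvAtD r (a + (m : Int)) = r[(a + (m : Int)).toNat] := by
      rw [pvAtD, PySem.List.pyGetD_eq_getElem _ _ (by omega) (by omega)]
    simp only [List.map_cons, List.map_nil, List.sum_cons, List.sum_nil, this]
    have htn : ((a + (m : Int)) + 1).toNat = (a + (m : Int)).toNat + 1 := by omega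
    rw [htn, List.sum_take_succ _ _ hidx]
    ring

theorem pvMap_rowD_range (mat : List (List Int)) (a b : Int) (h0 : 0 ≤ a) (hb : b ≤ (mat.length : Int)) :
    (PySem.List.pyRange a b 1).map (fun i => pvRowD mat i)
      = List.take (b - a).toNat (mat.drop a.toNat) := by
  apply List.ext_getElem
  · simp [PySem.List.length_pyRange_one]; omega
  · intro i h1 h2
    simp only [List.getElem_map, PySem.List.getElem_pyRange_one]
    rw [List.getElem_take, List.getElem_drop]
    have hlt : a + (i : Int) < b := by
      have := h1; simp [PySem.List.length_pyRange_one] at this; omega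
    rw [pvRowD, PySem.List.pyGetD_eq_getElem _ _ (by omega) (by omega)]
    congr 1
    omega

theorem pvRow_eq (r : List Int) (x0 x1 : Int) (h0 : 0 ≤ x0) (h01 : x0 ≤ x1) (h1 : x1 < (r.length : Int)) :
    ((PySem.List.pyRange x0 (x1 + 1) 1).map (fun dx => pvAtD r dx)).sum
      = pvAtD (pvPrefix r) (x1 + 1) - pvAtD (pvPrefix r) x0 := by
  have hk : x1 + 1 = x0 + (((x1 + 1 - x0).toNat : Nat) : Int) := by omega
  rw [hk, pvSeg_sum r x0 h0 _ (by omega)]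
  rw [pvPrefix_at r x0 h0 (by omega), pvPrefix_at r (x0 + (((x1 + 1 - x0).toNat : Nat) : Int)) (by omega) (by omega)]

theorem pvS_eq (mat : List (List Int)) (y x : Nat) (hy : y < mat.length)
    (hpre : ∀ dy, dy < mat.length → y ≤ dy + 1 → dy ≤ y + 1 →
      max 0 ((x : Int) - 1) ≤ min (((mat.getD 0 []).length : Int) - 1) ((x : Int) + 1) →
      min (((mat.getD 0 []).length : Int) - 1) ((x : Int) + 1) < ((mat.getD dy []).length : Int)) :
    (PySem.List.pyRange (max 0 ((y : Int) - 1)) (min ((mat.length : Int) - 1) ((y : Int) + 1) + 1) 1).foldl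
      (fun s dy =>
        (PySem.List.pyRange (max 0 ((x : Int) - 1)) (min (((mat.getD 0 []).length : Int) - 1) ((x : Int) + 1) + 1) 1).foldl
          (fun s dx => s + pvAtD (pvRowD mat dy) dx) s) 0
    = (if max 0 ((x : Int) - 1) ≤ min (((mat.getD 0 []).length : Int) - 1) ((x : Int) + 1) then
        (PySem.List.slice (mat.map pvPrefix) (some (max 0 ((y : Int) - 1)))
            (some (min ((mat.length : Int) - 1) ((y : Int) + 1) + 1))).foldl
          (fun s p => s + (pvAtD p (min (((mat.getD 0 []).length : Int) - 1) ((x : Int) + 1) + 1)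
                            - pvAtD p (max 0 ((x : Int) - 1)))) 0
      else 0) := by
  set x0 : Int := max 0 ((x : Int) - 1) with hx0
  set x1 : Int := min (((mat.getD 0 []).length : Int) - 1) ((x : Int) + 1) with hx1
  set y0 : Int := max 0 ((y : Int) - 1) with hy0
  set y1 : Int := min ((mat.length : Int) - 1) ((y : Int) + 1) with hy1
  have hy0n : 0 ≤ y0 := le_max_left _ _
  have hy01 : y0 ≤ y1 + 1 := by
    have : (y : Int) < mat.length := by exact_mod_cast hy
    simp only [hy0, hy1]; omega
  have hy1n : y1 + 1 ≤ (mat.length : Int) := by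
    have : (y : Int) < mat.length := by exact_mod_cast hy
    simp only [hy1]; omega
  by_cases hx01 : x0 ≤ x1
  · rw [if_pos hx01]
    -- LHS: turn both folds into sums
    simp only [PySem.List.foldl_add]
    rw [PySem.List.slice_toNat _ hy0n (by omega)]
    rw [← List.map_drop, ← List.map_take, List.map_map]
    have hseg : (PySem.List.pyRange y0 (y1 + 1) 1).map (fun i => pvRowD mat i)
        = List.take (y1 + 1 - y0).toNat (mat.drop y0.toNat) := pvMap_rowD_range mat y0 (y1 + 1) hy0n hy1n
    have hcount : (y1 + 1).toNat - y0.toNat = (y1 + 1 - y0).toNat := by omega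
    rw [hcount]
    congr 1
    rw [show (fun dy => (List.map (fun dx => pvAtD (pvRowD mat dy) dx) (PySem.List.pyRange x0 (x1 + 1) 1)).sum)
          = (fun r => (List.map (fun dx => pvAtD r dx) (PySem.List.pyRange x0 (x1 + 1) 1)).sum) ∘ (fun i => pvRowD mat i)
        from rfl, ← List.map_map, hseg]
    congr 1
    apply List.map_congr_left
    intro r hr
    -- find the index of r in the segment
    obtain ⟨i, hi, hri⟩ := List.getElem_of_mem hr
    have hil : i < (y1 + 1 - y0).toNat := by
      have := hi; simp [List.length_take, List.length_drop] at this; omega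
    have hidx : y0.toNat + i < mat.length := by
      have := hi; simp [List.length_take, List.length_drop] at this; omega
    have hrval : r = mat.getD (y0.toNat + i) [] := by
      rw [← hri, List.getElem_take, List.getElem_drop, List.getD_eq_getElem _ _ hidx]
    have hlenr : x1 < (r.length : Int) := by
      rw [hrval]
      apply hpre (y0.toNat + i) hidx
      · simp only [hy0] at *; omega
      · simp only [hy0, hy1] at *; omega
      · exact hx01
    rw [hrval] at hlenr ⊢
    exact pvRow_eq _ x0 x1 (le_max_left _ _) hx01 hlenr
  · rw [if_neg hx01]
    have hnil : PySem.List.pyRange x0 (x1 + 1) 1 = [] := PySem.List.pyRange_one_eq_nil (by omega)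
    simp only [hnil, List.foldl_nil]
    exact List.foldl_fixed _

theorem pvInnerSim (row : List Int) (fA fB : Int → Int)
    (h : ∀ x : Nat, x < row.length → row.getD x 0 ≠ 0 → fA (x : Int) = fB (x : Int)) :
    ∀ (rest done : List Int) (c : Int), row.drop done.length = rest →
    (PySem.List.pyRange ((done.length : Nat) : Int) (row.length : Int) 1).foldl
      (fun (st : List Int × Int) x =>
        if pvAtD row x = 0 then st
        else if fA x ≤ 4 then (PySem.List.pySetD st.1 x 0, st.2 + 1) else st)
      (done ++ rest, c)
    = (PySem.List.enumerate rest ((done.length : Nat) : Int)).foldl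
      (fun (st : List Int × Int) xv =>
        if xv.2 = 0 then (st.1 ++ [xv.2], st.2)
        else if fB xv.1 ≤ 4 then (st.1 ++ [0], st.2 + 1) else (st.1 ++ [xv.2], st.2))
      (done, c) := by
  intro rest
  induction rest with
  | nil =>
    intro done c hdrop
    have hle : row.length ≤ done.length := by
      simpa [List.drop_eq_nil_iff] using hdrop
    rw [PySem.List.pyRange_one_eq_nil (by exact_mod_cast hle)]
    simp [PySem.List.enumerate]
  | cons v rest' ih =>
    intro done c hdrop
    have hlt : done.length < row.length := by
      by_contra hge
      rw [List.drop_eq_nil_iff.mpr (by omega)] at hdrop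
      exact List.cons_ne_nil v rest' hdrop.symm
    have hget : row[done.length] = v ∧ row.drop (done.length + 1) = rest' := by
      have := List.drop_eq_getElem_cons hlt
      rw [hdrop] at this
      exact ⟨(List.cons.injEq _ _ _ _ ▸ this).1.symm, ((List.cons.injEq _ _ _ _ ▸ this).2).symm⟩
    have hv : pvAtD row ((done.length : Nat) : Int) = v := by
      rw [pvAtD, PySem.List.pyGetD_natCast, List.getD_eq_getElem _ _ hlt, hget.1]
    rw [PySem.List.pyRange_one_cons (by exact_mod_cast hlt), PySem.List.enumerate_cons]
    simp only [List.foldl_cons, hv]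
    by_cases hz : v = 0
    · rw [if_pos hz, if_pos hz]
      have e1 : ((done.length : Int) + 1) = (((done ++ [v]).length : Nat) : Int) := by
        simp
      have e2 : done ++ v :: rest' = (done ++ [v]) ++ rest' := by simp
      rw [e1, e2]
      exact ih (done ++ [v]) c (by simpa using hget.2)
    · rw [if_neg hz, if_neg hz]
      have hfafb : fA ((done.length : Nat) : Int) = fB ((done.length : Nat) : Int) := by
        apply h done.length hlt
        rw [List.getD_eq_getElem _ _ hlt, hget.1]; exact hz
      rw [hfafb]
      by_cases hs : fB ((done.length : Nat) : Int) ≤ 4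
      · rw [if_pos hs, if_pos hs]
        have hset : PySem.List.pySetD (done ++ v :: rest') ((done.length : Nat) : Int) 0
            = (done ++ [0]) ++ rest' := by
          rw [PySem.List.pySetD_natCast, List.set_append]
          simp
        rw [hset]
        have e1 : ((done.length : Int) + 1) = (((done ++ [(0 : Int)]).length : Nat) : Int) := by
          simp
        rw [e1]
        exact ih (done ++ [0]) (c + 1) (by simpa using hget.2)
      · rw [if_neg hs, if_neg hs]
        have e1 : ((done.length : Int) + 1) = (((done ++ [v]).length : Nat) : Int) := by
          simp
        have e2 : done ++ v :: rest' = (done ++ [v]) ++ rest' := by simp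
        rw [e1, e2]
        exact ih (done ++ [v]) c (by simpa using hget.2)

theorem pvOuterSim (mat : List (List Int)) (gA gB : Int → List Int → Int → List Int × Int)
    (h : ∀ y : Nat, y < mat.length → ∀ c : Int, gA (y : Int) (mat.getD y []) c = gB (y : Int) (mat.getD y []) c) :
    ∀ (rest : List (List Int)) (a : Nat) (acc : List (List Int) × Int), mat.drop a = rest →
    (PySem.List.pyRange ((a : Nat) : Int) (mat.length : Int) 1).foldl
      (fun (acc : List (List Int) × Int) y =>
        (acc.1 ++ [(gA y (pvRowD mat y) acc.2).1], (gA y (pvRowD mat y) acc.2).2)) acc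
    = (PySem.List.enumerate rest ((a : Nat) : Int)).foldl
      (fun (acc : List (List Int) × Int) yr =>
        (acc.1 ++ [(gB yr.1 yr.2 acc.2).1], (gB yr.1 yr.2 acc.2).2)) acc := by
  intro rest
  induction rest with
  | nil =>
    intro a acc hdrop
    have hle : mat.length ≤ a := by simpa [List.drop_eq_nil_iff] using hdrop
    rw [PySem.List.pyRange_one_eq_nil (by exact_mod_cast hle)]
    simp [PySem.List.enumerate]
  | cons r rest' ih =>
    intro a acc hdrop
    have hlt : a < mat.length := by
      by_contra hge
      rw [List.drop_eq_nil_iff.mpr (by omega)] at hdrop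
      exact List.cons_ne_nil r rest' hdrop.symm
    have hget : mat[a] = r ∧ mat.drop (a + 1) = rest' := by
      have := List.drop_eq_getElem_cons hlt
      rw [hdrop] at this
      exact ⟨(List.cons.injEq _ _ _ _ ▸ this).1.symm, ((List.cons.injEq _ _ _ _ ▸ this).2).symm⟩
    have hrow : pvRowD mat ((a : Nat) : Int) = r := by
      rw [pvRowD, PySem.List.pyGetD_natCast, List.getD_eq_getElem _ _ hlt, hget.1]
    rw [PySem.List.pyRange_one_cons (by exact_mod_cast hlt), PySem.List.enumerate_cons]
    simp only [List.foldl_cons, hrow]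
    have hg : gA ((a : Nat) : Int) r acc.2 = gB ((a : Nat) : Int) r acc.2 := by
      have := h a hlt acc.2
      rwa [List.getD_eq_getElem _ _ hlt, hget.1] at this
    rw [hg]
    have e1 : ((a : Int) + 1) = (((a + 1 : Nat) : Nat) : Int) := by push_cast; ring
    rw [e1]
    exact ih (a + 1) _ hget.2

-- A's outer-loop body as a function of (y, row, res): the whole inner x-loop of port A
def pvStepA (mat : List (List Int)) (y : Int) (row : List Int) (c : Int) : List Int × Int :=
  (PySem.List.pyRange 0 (row.length : Int) 1).foldl
    (fun (st : List Int × Int) x =>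
      if pvAtD row x = 0 then st
      else if (PySem.List.pyRange (max 0 (y - 1)) (min ((mat.length : Int) - 1) (y + 1) + 1) 1).foldl
          (fun s dy =>
            (PySem.List.pyRange (max 0 (x - 1)) (min (((pvRowD mat 0).length : Int) - 1) (x + 1) + 1) 1).foldl
              (fun s dx => s + pvAtD (pvRowD mat dy) dx) s) 0 ≤ 4
        then (PySem.List.pySetD st.1 x 0, st.2 + 1) else st)
    (row, c)

-- B's outer-loop body as a function of (y, row, res): the whole inner x-loop of port B
def pvStepB (mat : List (List Int)) (y : Int) (row : List Int) (c : Int) : List Int × Int :=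
  (PySem.List.enumerate row 0).foldl
    (fun (st : List Int × Int) xv =>
      if xv.2 = 0 then (st.1 ++ [xv.2], st.2)
      else if (if max 0 (xv.1 - 1) ≤ min ((match mat with | [] => (0 : Int) | r :: _ => (r.length : Int)) - 1) (xv.1 + 1) then
          (PySem.List.slice (mat.map pvPrefix) (some (max 0 (y - 1))) (some (min ((mat.length : Int) - 1) (y + 1) + 1))).foldl
            (fun s p => s + (pvAtD p (min ((match mat with | [] => (0 : Int) | r :: _ => (r.length : Int)) - 1) (xv.1 + 1) + 1)
                              - pvAtD p (max 0 (xv.1 - 1)))) 0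
        else 0) ≤ 4
      then (st.1 ++ [0], st.2 + 1) else (st.1 ++ [xv.2], st.2))
    ([], c)

-- ===== VERDICT (by name: the statement is the Claim_ definition above) =====
set_option maxHeartbeats 1000000 in
theorem count_rolls_py_spec : Claim_equal_count_rolls_py := by
  intro mat _ hpre
  show count_rolls_py mat = count_rolls_py_alt mat
  have hA : count_rolls_py mat
      = (PySem.List.pyRange (((0 : Nat) : Nat) : Int) (mat.length : Int) 1).foldl
          (fun (acc : List (List Int) × Int) y =>
            (acc.1 ++ [(pvStepA mat y (pvRowD mat y) acc.2).1], (pvStepA mat y (pvRowD mat y) acc.2).2)) ([], 0) := rfl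
  have hB : count_rolls_py_alt mat
      = (PySem.List.enumerate mat (((0 : Nat) : Nat) : Int)).foldl
          (fun (acc : List (List Int) × Int) yr =>
            (acc.1 ++ [(pvStepB mat yr.1 yr.2 acc.2).1], (pvStepB mat yr.1 yr.2 acc.2).2)) ([], 0) := rfl
  rw [hA, hB]
  refine pvOuterSim mat (pvStepA mat) (pvStepB mat) ?_ mat 0 ([], 0) rfl
  intro y hy c
  have hm0a : pvRowD mat 0 = mat.getD 0 [] := by
    rw [pvRowD, PySem.List.pyGetD_zero]
  have hm0b : (match mat with | [] => (0 : Int) | r :: _ => (r.length : Int)) = ((mat.getD 0 []).length : Int) := by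
    cases mat <;> simp
  have key := pvInnerSim (mat.getD y [])
    (fun xi => (PySem.List.pyRange (max 0 (((y : Nat) : Int) - 1)) (min ((mat.length : Int) - 1) (((y : Nat) : Int) + 1) + 1) 1).foldl
      (fun s dy =>
        (PySem.List.pyRange (max 0 (xi - 1)) (min (((pvRowD mat 0).length : Int) - 1) (xi + 1) + 1) 1).foldl
          (fun s dx => s + pvAtD (pvRowD mat dy) dx) s) 0)
    (fun xi => if max 0 (xi - 1) ≤ min ((match mat with | [] => (0 : Int) | r :: _ => (r.length : Int)) - 1) (xi + 1) then
        (PySem.List.slice (mat.map pvPrefix) (some (max 0 (((y : Nat) : Int) - 1)))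
            (some (min ((mat.length : Int) - 1) (((y : Nat) : Int) + 1) + 1))).foldl
          (fun s p => s + (pvAtD p (min ((match mat with | [] => (0 : Int) | r :: _ => (r.length : Int)) - 1) (xi + 1) + 1)
                            - pvAtD p (max 0 (xi - 1)))) 0
      else 0)
    (by
      intro x hx hnz
      have hpre' : ∀ dy, dy < mat.length → y ≤ dy + 1 → dy ≤ y + 1 →
          max 0 ((x : Int) - 1) ≤ min (((mat.getD 0 []).length : Int) - 1) ((x : Int) + 1) →
          min (((mat.getD 0 []).length : Int) - 1) ((x : Int) + 1) < ((mat.getD dy []).length : Int) := by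
        intro dy hdy h1 h2 h3
        have hw := hpre y hy x hx dy hdy hnz
        simp only [pvWinOkB, Bool.or_eq_true, Bool.not_eq_true', Bool.and_eq_false_iff,
          decide_eq_true_eq, decide_eq_false_iff_not] at hw
        rcases hw with ((hw | hw) | hw) | hw <;> omega
      simp only [hm0a, hm0b]
      exact pvS_eq mat y x hy hpre')
    (mat.getD y []) [] c rfl
  unfold pvStepA pvStepB
  exact key
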